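-- pv_equiv track=rewrite | github.com/gsmll/colombian-consulate-chatbot | consulate_chatbot.py | _build_pdf_paragraphs
-- ===== SOURCE A (Python) =====
-- from typing import Optional, Dict, Any, List, Callable
--
-- def _build_pdf_paragraphs(corpus: str) -> List[str]:
--     """Build paragraph-like chunks from raw PDF text.
--     Prefer splitting on blank lines; otherwise, create sliding windows of 2-3 lines.
--     """
--     lines = [ln.rstrip() for ln in corpus.splitlines()]
--     # Group by blank lines
--     paras: List[str] = []
--     cur: List[str] = []
--     for ln in lines:
--         if not ln.strip():
--             if cur:
--                 paras.append(" ".join(cur).strip())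
--                 cur = []
--         else:
--             cur.append(ln.strip())
--     if cur:
--         paras.append(" ".join(cur).strip())
--     # If the PDF has no blank-line structure, synthesize windows
--     if not paras or len(paras) < 5:
--         win = 3
--         synthesized = []
--         for i in range(0, len(lines), win):
--             chunk = " ".join(ln.strip() for ln in lines[i:i+win] if ln.strip())
--             if chunk:
--                 synthesized.append(chunk)
--         if synthesized:
--             paras = synthesized
--     # De-dup short repeats and keep reasonable length
--     uniq: List[str] = []
--     seen = set()
--     for p in paras:
--         key = p[:120]
--         if key in seen:
--             continue
--         seen.add(key)
--         uniq.append(p[:1200])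
--     return uniq
-- ===== SOURCE B (Python) =====
-- def _paragraph_chunks(ls):
--     """Recursively split the line list into runs of non-blank lines."""
--     if not ls:
--         return []
--     if not ls[0].strip():
--         return _paragraph_chunks(ls[1:])
--     k = 1
--     while k < len(ls) and ls[k].strip():
--         k += 1
--     para = " ".join(l.strip() for l in ls[:k]).strip()
--     return [para] + _paragraph_chunks(ls[k:])
--
--
-- def _build_pdf_paragraphs(corpus: str):
--     lines = [ln.rstrip() for ln in corpus.splitlines()]
--     paras = _paragraph_chunks(lines)
--     if len(paras) < 5:
--         synth = [c for c in
--                  (" ".join(l.strip() for l in lines[i:i + 3] if l.strip())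
--                   for i in range(0, len(lines), 3)) if c]
--         if synth:
--             paras = synth
--     chosen = {}
--     for p in paras:
--         chosen.setdefault(p[:120], p[:1200])
--     return list(chosen.values())
-- ===== Notes on version B (the rewrite author's own statement) =====
-- stated objective: alternative
-- what changed: Paragraph grouping is done by recursive splitting of the line list into non-blank runs (takeWhile/dropWhile) instead of A's accumulator state machine, the window synthesis is a map/filter comprehension instead of an append loop, and the dedup uses one insertion-ordered dict via setdefault instead of A's parallel list + seen-set.
import Mathlib
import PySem

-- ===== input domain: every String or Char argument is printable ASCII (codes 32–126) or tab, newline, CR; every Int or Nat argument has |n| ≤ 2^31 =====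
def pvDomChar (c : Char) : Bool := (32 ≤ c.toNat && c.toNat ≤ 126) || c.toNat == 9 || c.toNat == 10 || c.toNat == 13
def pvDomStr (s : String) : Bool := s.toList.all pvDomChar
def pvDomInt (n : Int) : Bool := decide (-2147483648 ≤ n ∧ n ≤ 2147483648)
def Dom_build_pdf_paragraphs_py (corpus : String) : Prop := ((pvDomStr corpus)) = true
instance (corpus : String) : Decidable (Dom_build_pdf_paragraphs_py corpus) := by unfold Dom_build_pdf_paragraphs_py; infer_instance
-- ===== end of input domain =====

-- B replaces A's paragraph-building accumulator state machine by recursive run-splitting, the window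
-- loop by a map/filter comprehension and the set+list dedup by one insertion-ordered dict (objective:
-- alternative decomposition, same cost).

-- ===== PORT A =====
def build_pdf_paragraphs_py (corpus : String) : List String :=
  let lines := (PySem.Str.splitlines corpus).map (fun ln => PySem.Str.rstrip ln)
  let st := lines.foldl (fun (acc : List String × List String) ln =>
      if PySem.Str.strip ln == "" then
        (if acc.2 ≠ [] then (acc.1 ++ [PySem.Str.strip (PySem.Str.join " " acc.2)], ([] : List String)) else acc)
      else (acc.1, acc.2 ++ [PySem.Str.strip ln])) ([], [])
  let paras := if st.2 ≠ [] then st.1 ++ [PySem.Str.strip (PySem.Str.join " " st.2)] else st.1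
  let paras := if paras = [] ∨ paras.length < 5 then
      let synthesized := (PySem.List.pyRange 0 lines.length 3).foldl (fun syn i =>
          let chunk := PySem.Str.join " " (((PySem.List.slice lines (some i) (some (i + 3))).filter
              (fun ln => !(PySem.Str.strip ln == ""))).map (fun ln => PySem.Str.strip ln))
          if chunk ≠ "" then syn ++ [chunk] else syn) []
      if synthesized ≠ [] then synthesized else paras
    else paras
  (paras.foldl (fun (acc : List String × PySem.Set String) p =>
      let key := PySem.Str.slice p none (some 120)
      if PySem.Set.contains acc.2 key then acc
      else (acc.1 ++ [PySem.Str.slice p none (some 1200)], PySem.Set.add acc.2 key))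
    ([], PySem.Set.empty)).1

-- ===== PORT B =====
def pvParagraphChunks : List String → List String
  | [] => []
  | l :: ls =>
    if PySem.Str.strip l == "" then pvParagraphChunks ls
    else
      PySem.Str.strip (PySem.Str.join " "
          ((l :: ls.takeWhile (fun x => !(PySem.Str.strip x == ""))).map (fun x => PySem.Str.strip x)))
        :: pvParagraphChunks (ls.dropWhile (fun x => !(PySem.Str.strip x == "")))
termination_by ls => ls.length
decreasing_by
  · simp
  · have := List.length_dropWhile_le (fun x => !(PySem.Str.strip x == "")) ls
    simp at *; omega

def build_pdf_paragraphs_py_alt (corpus : String) : List String :=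
  let lines := (PySem.Str.splitlines corpus).map (fun ln => PySem.Str.rstrip ln)
  let paras0 := pvParagraphChunks lines
  let paras := if paras0.length < 5 then
      let synth := ((PySem.List.pyRange 0 lines.length 3).map (fun i =>
          PySem.Str.join " " (((PySem.List.slice lines (some i) (some (i + 3))).filter
            (fun ln => !(PySem.Str.strip ln == ""))).map (fun ln => PySem.Str.strip ln)))).filter
          (fun c => !(c == ""))
      if synth ≠ [] then synth else paras0
    else paras0
  (paras.foldl (fun (d : PySem.Dict String String) p =>
      d.setdefault (PySem.Str.slice p none (some 120)) (PySem.Str.slice p none (some 1200)))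
    PySem.Dict.empty).values

-- ===== PRECONDITION & SPEC =====
def Spec_build_pdf_paragraphs_py (corpus : String) (out : List String) : Prop := out = build_pdf_paragraphs_py_alt corpus
instance (corpus : String) (out : List String) : Decidable (Spec_build_pdf_paragraphs_py corpus out) := by unfold Spec_build_pdf_paragraphs_py; infer_instance

-- ===== CLAIM (what is proved, stated in full; the proofs are below) =====
def Claim_equal_build_pdf_paragraphs_py : Prop := ∀ (corpus : String), Dom_build_pdf_paragraphs_py corpus → Spec_build_pdf_paragraphs_py corpus (build_pdf_paragraphs_py corpus)

-- ===== LEMMAS AND PROOFS =====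

-- A's state-machine step over one line
def pvStepA (acc : List String × List String) (ln : String) : List String × List String :=
  if PySem.Str.strip ln == "" then
    (if acc.2 ≠ [] then (acc.1 ++ [PySem.Str.strip (PySem.Str.join " " acc.2)], ([] : List String)) else acc)
  else (acc.1, acc.2 ++ [PySem.Str.strip ln])

def pvFinalize (acc : List String × List String) : List String :=
  if acc.2 ≠ [] then acc.1 ++ [PySem.Str.strip (PySem.Str.join " " acc.2)] else acc.1

def pvChunk (lines : List String) (i : Int) : String :=
  PySem.Str.join " " (((PySem.List.slice lines (some i) (some (i + 3))).filter
    (fun ln => !(PySem.Str.strip ln == ""))).map (fun ln => PySem.Str.strip ln))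

def pvDedupA (acc : List String × PySem.Set String) (p : String) : List String × PySem.Set String :=
  if PySem.Set.contains acc.2 (PySem.Str.slice p none (some 120)) then acc
  else (acc.1 ++ [PySem.Str.slice p none (some 1200)], PySem.Set.add acc.2 (PySem.Str.slice p none (some 120)))

def pvDedupB (d : PySem.Dict String String) (p : String) : PySem.Dict String String :=
  d.setdefault (PySem.Str.slice p none (some 120)) (PySem.Str.slice p none (some 1200))

-- over a run of non-blank lines only cur grows
theorem pvRunLemma (t : List String) (h : ∀ x ∈ t, ¬(PySem.Str.strip x == "") = true)
    (P C : List String) : t.foldl pvStepA (P, C) = (P, C ++ t.map (fun x => PySem.Str.strip x)) := by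
  induction t generalizing C with
  | nil => simp
  | cons a t ih =>
    have ha := h a (by simp)
    simp only [List.foldl_cons, pvStepA]
    rw [if_neg (by simpa using ha)]
    rw [ih (fun x hx => h x (by simp [hx]))]
    simp

theorem pvPhase1Aux (n : Nat) : ∀ (ls : List String), ls.length ≤ n → ∀ P,
    pvFinalize (ls.foldl pvStepA (P, [])) = P ++ pvParagraphChunks ls := by
  induction n with
  | zero =>
    intro ls h P
    have : ls = [] := List.length_eq_zero_iff.1 (Nat.le_zero.1 h)
    subst this
    simp [pvFinalize, pvParagraphChunks]
  | succ n ih =>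
    intro ls h P
    match ls with
    | [] => simp [pvFinalize, pvParagraphChunks]
    | l :: ls =>
      by_cases hb : (PySem.Str.strip l == "") = true
      · rw [pvParagraphChunks, if_pos hb]
        simp only [List.foldl_cons, pvStepA]
        rw [if_pos hb, if_neg (by simp)]
        exact ih ls (by simp at h; omega) P
      · rw [pvParagraphChunks, if_neg hb]
        simp only [List.foldl_cons, pvStepA]
        rw [if_neg hb]
        have hsplit := (List.takeWhile_append_dropWhile (p := fun x => !(PySem.Str.strip x == "")) (l := ls)).symm
        set t := ls.takeWhile (fun x => !(PySem.Str.strip x == "")) with ht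
        set d := ls.dropWhile (fun x => !(PySem.Str.strip x == "")) with hd
        rw [hsplit, List.foldl_append]
        have hrun : ∀ x ∈ t, ¬(PySem.Str.strip x == "") = true := by
          intro x hx
          have := List.mem_takeWhile_imp (ht ▸ hx)
          simpa using this
        have hstep : (((P : List String), ([] : List String)).1, ((P : List String), ([] : List String)).2 ++ [PySem.Str.strip l]) = (P, [PySem.Str.strip l]) := by simp
        rw [hstep, pvRunLemma t hrun P [PySem.Str.strip l]]
        match hdd : d with
        | [] =>
          simp only [List.foldl_nil, pvFinalize]
          rw [if_pos (by simp)]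
          simp [pvParagraphChunks]
        | b :: d' =>
          have hbb : (PySem.Str.strip b == "") = true := by
            have := List.head_dropWhile_not (p := fun x => !(PySem.Str.strip x == "")) (l := ls)
            rw [← hd] at this
            simpa using this (by simp)
          simp only [List.foldl_cons, pvStepA]
          rw [if_pos hbb, if_pos (by simp)]
          have hlen : d'.length ≤ n := by
            have h2 : t.length + (b :: d').length = ls.length := by
              rw [hsplit]; simp [List.length_append]
            simp at h2 h; omega
          rw [ih d' hlen]
          rw [pvParagraphChunks, if_pos hbb]
          simp

-- dedup loop: list+set pair vs insertion-ordered dict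
theorem pvDedup (ps : List String) (uniq : List String) (d : PySem.Dict String String)
    (hv : d.values = uniq) (hk : d.keys.Nodup) :
    (ps.foldl pvDedupA (uniq, d.keys)).1 = (ps.foldl pvDedupB d).values := by
  induction ps generalizing uniq d with
  | nil => simpa using hv.symm
  | cons p ps ih =>
    simp only [List.foldl_cons, pvDedupA, pvDedupB]
    by_cases hc : d.contains (PySem.Str.slice p none (some 120)) = true
    · rw [PySem.Dict.setdefault_of_contains d _ hc]
      have hmem : PySem.Set.contains d.keys (PySem.Str.slice p none (some 120)) = true := by
        rw [PySem.Set.contains_iff]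
        exact (PySem.Dict.contains_iff_mem_keys _ _).1 hc
      rw [if_pos hmem]
      exact ih uniq d hv hk
    · rw [PySem.Dict.setdefault_of_not_contains d _ (by simpa using hc)]
      have hnm : ¬ PySem.Str.slice p none (some 120) ∈ d.keys := by
        intro hmem
        exact hc ((PySem.Dict.contains_iff_mem_keys _ _).2 hmem)
      rw [if_neg (by simp [hnm])]
      have hitems := PySem.Dict.items_insert_of_not_contains d
        (k := PySem.Str.slice p none (some 120)) (PySem.Str.slice p none (some 1200))
        (by simpa using hc)
      have hkeys : (d.insert (PySem.Str.slice p none (some 120)) (PySem.Str.slice p none (some 1200))).keys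
          = d.keys ++ [PySem.Str.slice p none (some 120)] := by
        simp [PySem.Dict.keys, hitems]
      have hvals : (d.insert (PySem.Str.slice p none (some 120)) (PySem.Str.slice p none (some 1200))).values
          = uniq ++ [PySem.Str.slice p none (some 1200)] := by
        simp [PySem.Dict.values, hitems, ← hv]
      have hadd : PySem.Set.add d.keys (PySem.Str.slice p none (some 120))
          = d.keys ++ [PySem.Str.slice p none (some 120)] := PySem.Set.add_of_not_mem hnm
      rw [hadd, ← hkeys]
      exact ih _ _ hvals (by
        rw [hkeys]; simp [List.nodup_append, hk]
        intro a ha he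
        exact hnm (he ▸ ha))

theorem pvDedupZero (ps : List String) :
    (ps.foldl pvDedupA ([], PySem.Set.empty)).1 = (ps.foldl pvDedupB PySem.Dict.empty).values :=
  pvDedup ps [] PySem.Dict.empty rfl (by simp)

-- whole pipeline on the (already rstripped) line list
theorem pvPipeline (lines : List String) :
    (let paras := pvFinalize (lines.foldl pvStepA ([], []))
     let paras2 := if paras = [] ∨ paras.length < 5 then
        (let syn := (PySem.List.pyRange 0 lines.length 3).foldl
            (fun syn i => if pvChunk lines i ≠ "" then syn ++ [pvChunk lines i] else syn) []
         if syn ≠ [] then syn else paras)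
       else paras
     (paras2.foldl pvDedupA ([], PySem.Set.empty)).1)
    = (let paras0 := pvParagraphChunks lines
       let paras := if paras0.length < 5 then
          (let synth := ((PySem.List.pyRange 0 lines.length 3).map (pvChunk lines)).filter (fun c => !(c == ""))
           if synth ≠ [] then synth else paras0)
         else paras0
       (paras.foldl pvDedupB PySem.Dict.empty).values) := by
  simp only []
  rw [pvPhase1Aux lines.length lines le_rfl []]
  rw [List.nil_append]
  have hg : (pvParagraphChunks lines = [] ∨ (pvParagraphChunks lines).length < 5)
      = ((pvParagraphChunks lines).length < 5) := by
    apply propext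
    constructor
    · rintro (h | h)
      · simp [h]
      · exact h
    · exact Or.inr
  simp only [hg]
  have h2 : ((PySem.List.pyRange 0 lines.length 3).foldl
        (fun syn i => if pvChunk lines i ≠ "" then syn ++ [pvChunk lines i] else syn) [])
      = ((PySem.List.pyRange 0 lines.length 3).map (pvChunk lines)).filter (fun c => !(c == "")) := by
    rw [List.filter_map]
    rw [PySem.List.foldl_append_ite (fun i => pvChunk lines i ≠ "") (pvChunk lines)
      (PySem.List.pyRange 0 lines.length 3) []]
    rw [List.nil_append]
    congr 1
    apply List.filter_congr
    intro i _
    cases h : pvChunk lines i == "" <;> simp_all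
  rw [h2]
  split
  · split
    · exact pvDedupZero _
    · exact pvDedupZero _
  · exact pvDedupZero _

-- ===== VERDICT (by name: the statement is the Claim_ definition above) =====
theorem build_pdf_paragraphs_py_spec : Claim_equal_build_pdf_paragraphs_py := by
  intro corpus _
  show build_pdf_paragraphs_py corpus = build_pdf_paragraphs_py_alt corpus
  exact pvPipeline ((PySem.Str.splitlines corpus).map (fun ln => PySem.Str.rstrip ln))
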